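-- pv_equiv track=rewrite | github.com/koushikchinta/DSA | LC_1680.py | concatenatedBinary1
-- ===== SOURCE A (Python) =====
-- def concatenatedBinary1(n: int) -> int:
--     '''
--     >>> concatenatedBinary1(1)
--     1
--     >>> concatenatedBinary1(3)
--     27
--     >>> concatenatedBinary1(12)
--     505379714
--     '''
--     MOD = 10**9+7
--
--     start = 1
--     result = 0
--     current_bit_length = 1
--
--     while start <= n:
--         end = min(n + 1, start << 1)
--
--         # All these number contain bit_length of (current_bit_length)
--         for current_number in range(start, end):
--             result = (result << current_bit_length | current_number) % MOD
--
--         current_bit_length += 1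
--         start = end
--
--     return result
-- ===== SOURCE B (Python) =====
-- def _block(q, m, MOD):
--     # For a run of m consecutive numbers s, s+1, ..., s+m-1 (any s), all of the
--     # same bit length L with q = 2**L, the appended contribution is
--     #   s*G + J  where  G = sum_{j<m} q**(m-1-j)  and  J = sum_{j<m} j*q**(m-1-j),
--     # and the old result is shifted by P = q**m.  Returns (P, G, J) mod MOD,
--     # computed by binary doubling on m in O(log m) multiplications.
--     if m == 0:
--         return (1, 0, 0)
--     P, G, J = _block(q, m // 2, MOD)
--     h = m // 2
--     # double the run: size h -> 2*h
--     P2 = P * P % MOD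
--     G2 = G * (P + 1) % MOD
--     J2 = (J * (P + 1) + h * G) % MOD
--     if m % 2 == 1:
--         # append one more number (index m-1 = 2*h) at the end
--         P2, G2, J2 = P2 * q % MOD, (G2 * q + 1) % MOD, (J2 * q + 2 * h) % MOD
--     return (P2, G2, J2)
--
--
-- def concatenatedBinary1(n: int) -> int:
--     MOD = 10**9 + 7
--     result = 0
--     start = 1
--     L = 1
--     while start <= n:
--         m = min(n, 2 * start - 1) - start + 1   # numbers of bit length L that are <= n
--         P, G, J = _block(1 << L, m, MOD)
--         result = (result * P + start * G + J) % MOD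
--         start *= 2
--         L += 1
--     return result
-- ===== Notes on version B (the rewrite author's own statement) =====
-- stated objective: faster
-- what changed: B replaces A's per-number inner loop by a closed-form evaluation of each bit-length group: the arithmetic-geometric block sum s*G+J and the shift q^m are computed mod 1e9+7 by binary doubling recurrences (no division needed), so only O(log n) groups of O(log n) multiplications remain.
import Mathlib
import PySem

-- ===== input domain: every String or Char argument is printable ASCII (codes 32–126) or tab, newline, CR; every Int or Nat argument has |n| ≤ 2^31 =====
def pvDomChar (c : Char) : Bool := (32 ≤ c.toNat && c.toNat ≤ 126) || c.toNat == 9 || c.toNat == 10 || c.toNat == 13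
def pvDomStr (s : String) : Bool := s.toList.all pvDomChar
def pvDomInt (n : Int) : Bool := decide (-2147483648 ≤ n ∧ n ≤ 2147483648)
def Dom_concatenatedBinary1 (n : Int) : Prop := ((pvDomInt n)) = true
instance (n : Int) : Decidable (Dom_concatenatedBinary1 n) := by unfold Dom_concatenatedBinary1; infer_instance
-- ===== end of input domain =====

-- B evaluates each bit-length group in closed form (block sums by binary doubling, mod 1e9+7)
-- instead of A's per-number inner loop; same return value.

-- ===== PORT A =====
-- A's while loop; `fuel` only makes the recursion total (it is never exhausted on the
-- actual call: `start` at least doubles each round, so iterations ≤ n + 1 - start).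
def concatBinALoop (fuel : Nat) (n start result L : Int) : Int :=
  match fuel with
  | 0 => result
  | fuel + 1 =>
    if start ≤ n then
      -- end = min(n + 1, start << 1)
      let e := min (n + 1) (start <<< (1 : Int))
      -- for current_number in range(start, end): result = (result << L | current_number) % MOD
      let result' := (PySem.List.pyRange start e 1).foldl
        (fun r c => PySem.Int.mod (PySem.Int.bor (r <<< L) c) 1000000007) result
      concatBinALoop fuel n e result' (L + 1)
    else result

def concatenatedBinary1 (n : Int) : Int :=
  concatBinALoop (n.toNat + 1) n 1 0 1

-- ===== PORT B =====
-- _block's doubling step: from (P, G, J) for a run of size h to the run of size 2*h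
def blockDouble (h : Int) (t : Int × Int × Int) : Int × Int × Int :=
  (PySem.Int.mod (t.1 * t.1) 1000000007,
   PySem.Int.mod (t.2.1 * (t.1 + 1)) 1000000007,
   PySem.Int.mod (t.2.2 * (t.1 + 1) + h * t.2.1) 1000000007)

-- _block's odd step: if m is odd, append one more number (index m-1 = 2*h) at the end
def blockOdd (q m h : Int) (t : Int × Int × Int) : Int × Int × Int :=
  if PySem.Int.mod m 2 = 1 then
    (PySem.Int.mod (t.1 * q) 1000000007,
     PySem.Int.mod (t.2.1 * q + 1) 1000000007,
     PySem.Int.mod (t.2.2 * q + 2 * h) 1000000007)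
  else t

-- _block(q, m, MOD): (P, G, J) mod MOD for a run of m consecutive numbers of one bit
-- length, by binary doubling on m.  Python recurses on m // 2 with base case m == 0;
-- the guard `m ≤ 0` only makes the recursion total (m < 0 is unreachable from the caller).
def blockB (q m : Int) : Int × Int × Int :=
  if _hm : m ≤ 0 then (1, 0, 0)
  else
    blockOdd q m (PySem.Int.floordiv m 2)
      (blockDouble (PySem.Int.floordiv m 2) (blockB q (PySem.Int.floordiv m 2)))
termination_by m.toNat
decreasing_by
  rw [PySem.Int.floordiv_eq_ediv_of_pos (by norm_num)]
  omega

-- B's while loop, fuel-totalised exactly like A's.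
def concatBinBLoop (fuel : Nat) (n start result L : Int) : Int :=
  match fuel with
  | 0 => result
  | fuel + 1 =>
    if start ≤ n then
      -- m = min(n, 2*start - 1) - start + 1
      let m := min n (2 * start - 1) - start + 1
      -- P, G, J = _block(1 << L, m, MOD)
      let t := blockB ((1 : Int) <<< L) m
      -- result = (result * P + start * G + J) % MOD
      let result' := PySem.Int.mod (result * t.1 + start * t.2.1 + t.2.2) 1000000007
      concatBinBLoop fuel n (start * 2) result' (L + 1)
    else result

def concatenatedBinary1_alt (n : Int) : Int :=
  concatBinBLoop (n.toNat + 1) n 1 0 1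

-- ===== PRECONDITION & SPEC =====
def Spec_concatenatedBinary1 (n : Int) (out : Int) : Prop := out = concatenatedBinary1_alt n
instance (n : Int) (out : Int) : Decidable (Spec_concatenatedBinary1 n out) := by unfold Spec_concatenatedBinary1; infer_instance

-- ===== CLAIM (what is proved, stated in full; the proofs are below) =====
def Claim_equal_concatenatedBinary1 : Prop := ∀ (n : Int), Dom_concatenatedBinary1 n → Spec_concatenatedBinary1 n (concatenatedBinary1 n)

-- ===== LEMMAS AND PROOFS =====

-- reference sums for one block of m consecutive numbers starting at s, base q:
-- pvG q m = Σ_{j<m} q^(m-1-j),  pvJ q m = Σ_{j<m} j·q^(m-1-j)  (block value = s·G + J)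
def pvG (q : Int) : Nat → Int
  | 0 => 0
  | m + 1 => pvG q m * q + 1

def pvJ (q : Int) : Nat → Int
  | 0 => 0
  | m + 1 => pvJ q m * q + (m : Int)

lemma pvG_add (q : Int) (a b : Nat) : pvG q (a + b) = pvG q a * q ^ b + pvG q b := by
  induction b with
  | zero => simp [pvG]
  | succ b ih =>
    rw [show a + (b + 1) = (a + b) + 1 from rfl, pvG, ih, pvG, pow_succ]
    ring

lemma pvJ_add (q : Int) (a b : Nat) :
    pvJ q (a + b) = pvJ q a * q ^ b + (a : Int) * pvG q b + pvJ q b := by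
  induction b with
  | zero => simp [pvJ, pvG]
  | succ b ih =>
    rw [show a + (b + 1) = (a + b) + 1 from rfl, pvJ, ih, pvJ, pvG, pow_succ]
    push_cast
    ring

-- x % M ≡ x (mod M); the workhorse congruence
lemma pv_mm (x : Int) : x % 1000000007 ≡ x [ZMOD 1000000007] :=
  Int.emod_emod_of_dvd x dvd_rfl

-- the doubling step is exact on reduced block triples
lemma blockDouble_eq (q : Int) (hN : Nat) :
    blockDouble ((hN : Nat) : Int)
      (q ^ hN % 1000000007, pvG q hN % 1000000007, pvJ q hN % 1000000007)
      = (q ^ (hN + hN) % 1000000007, pvG q (hN + hN) % 1000000007,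
         pvJ q (hN + hN) % 1000000007) := by
  unfold blockDouble
  simp only [PySem.Int.mod_eq_emod_of_pos (show (0:Int) < 1000000007 by norm_num)]
  refine Prod.ext ?_ (Prod.ext ?_ ?_)
  · show (q ^ hN % 1000000007 * (q ^ hN % 1000000007)) % 1000000007 = q ^ (hN + hN) % 1000000007
    calc (q ^ hN % 1000000007 * (q ^ hN % 1000000007)) % 1000000007
        = (q ^ hN * q ^ hN) % 1000000007 := (pv_mm _).mul (pv_mm _)
      _ = q ^ (hN + hN) % 1000000007 := by rw [pow_add]
  · show (pvG q hN % 1000000007 * (q ^ hN % 1000000007 + 1)) % 1000000007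
        = pvG q (hN + hN) % 1000000007
    calc (pvG q hN % 1000000007 * (q ^ hN % 1000000007 + 1)) % 1000000007
        = (pvG q hN * (q ^ hN + 1)) % 1000000007 := (pv_mm _).mul ((pv_mm _).add_right 1)
      _ = pvG q (hN + hN) % 1000000007 := by rw [pvG_add]; ring_nf
  · show (pvJ q hN % 1000000007 * (q ^ hN % 1000000007 + 1)
        + ((hN : Nat) : Int) * (pvG q hN % 1000000007)) % 1000000007
        = pvJ q (hN + hN) % 1000000007
    calc (pvJ q hN % 1000000007 * (q ^ hN % 1000000007 + 1)
          + ((hN : Nat) : Int) * (pvG q hN % 1000000007)) % 1000000007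
        = (pvJ q hN * (q ^ hN + 1) + ((hN : Nat) : Int) * pvG q hN) % 1000000007 :=
          ((pv_mm _).mul ((pv_mm _).add_right 1)).add ((pv_mm _).mul_left _)
      _ = pvJ q (hN + hN) % 1000000007 := by rw [pvJ_add]; ring_nf

-- the odd step is exact on reduced block triples
lemma blockOdd_eq_odd (q m : Int) (hN : Nat) (hodd : PySem.Int.mod m 2 = 1) :
    blockOdd q m ((hN : Nat) : Int)
      (q ^ (hN + hN) % 1000000007, pvG q (hN + hN) % 1000000007, pvJ q (hN + hN) % 1000000007)
      = (q ^ (hN + hN + 1) % 1000000007, pvG q (hN + hN + 1) % 1000000007,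
         pvJ q (hN + hN + 1) % 1000000007) := by
  unfold blockOdd
  rw [if_pos hodd]
  simp only [PySem.Int.mod_eq_emod_of_pos (show (0:Int) < 1000000007 by norm_num)]
  refine Prod.ext ?_ (Prod.ext ?_ ?_)
  · show (q ^ (hN + hN) % 1000000007 * q) % 1000000007 = q ^ (hN + hN + 1) % 1000000007
    calc (q ^ (hN + hN) % 1000000007 * q) % 1000000007
        = (q ^ (hN + hN) * q) % 1000000007 := (pv_mm _).mul_right q
      _ = q ^ (hN + hN + 1) % 1000000007 := by rw [pow_succ]
  · show (pvG q (hN + hN) % 1000000007 * q + 1) % 1000000007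
        = pvG q (hN + hN + 1) % 1000000007
    calc (pvG q (hN + hN) % 1000000007 * q + 1) % 1000000007
        = (pvG q (hN + hN) * q + 1) % 1000000007 := ((pv_mm _).mul_right q).add_right 1
      _ = pvG q (hN + hN + 1) % 1000000007 := by rw [pvG]
  · show (pvJ q (hN + hN) % 1000000007 * q + 2 * ((hN : Nat) : Int)) % 1000000007
        = pvJ q (hN + hN + 1) % 1000000007
    calc (pvJ q (hN + hN) % 1000000007 * q + 2 * ((hN : Nat) : Int)) % 1000000007
        = (pvJ q (hN + hN) * q + 2 * ((hN : Nat) : Int)) % 1000000007 :=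
          ((pv_mm _).mul_right q).add_right _
      _ = pvJ q (hN + hN + 1) % 1000000007 := by
          rw [pvJ]; push_cast; ring_nf

-- blockB computes exactly (q^m, G, J) reduced mod 1e9+7
lemma blockB_eq :
    ∀ (mN : Nat) (q m : Int), 0 ≤ m → m.toNat = mN →
    blockB q m = (q ^ mN % 1000000007, pvG q mN % 1000000007, pvJ q mN % 1000000007) := by
  intro mN
  induction mN using Nat.strong_induction_on with
  | _ mN ih =>
    intro q m hm hmN
    rw [blockB]
    by_cases h0 : m ≤ 0
    · rw [dif_pos h0]
      have : mN = 0 := by omega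
      subst this
      simp [pvG, pvJ]
    · rw [dif_neg h0]
      have hfd : PySem.Int.floordiv m 2 = m / 2 :=
        PySem.Int.floordiv_eq_ediv_of_pos (by norm_num)
      have hN : (m / 2).toNat = mN / 2 := by omega
      have hrec := ih (mN / 2) (by omega) q (m / 2) (by omega) hN
      have hcast : m / 2 = ((mN / 2 : Nat) : Int) := by omega
      rw [hfd, hrec, hcast, blockDouble_eq]
      by_cases hodd : PySem.Int.mod m 2 = 1
      · have hmod2 : m % 2 = 1 := by
          rwa [PySem.Int.mod_eq_emod_of_pos (by norm_num)] at hodd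
        have hmN2 : mN = mN / 2 + mN / 2 + 1 := by omega
        rw [blockOdd_eq_odd q m (mN / 2) hodd, ← hmN2]
      · have hmod2 : m % 2 = 0 := by
          rw [PySem.Int.mod_eq_emod_of_pos (by norm_num)] at hodd
          omega
        have hmN2 : mN = mN / 2 + mN / 2 := by omega
        unfold blockOdd
        rw [if_neg hodd, ← hmN2]

-- Python's  r << k | c  is  r * 2^k + c  when 0 ≤ r and 0 ≤ c < 2^k
lemma bor_shl_eq (r c : Int) (k : Nat) (hr : 0 ≤ r) (hc : 0 ≤ c) (hck : c < 2 ^ k) :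
    PySem.Int.bor (r <<< ((k : Nat) : Int)) c = r * 2 ^ k + c := by
  have hmul : r <<< ((k : Nat) : Int) = r * 2 ^ k := by
    exact_mod_cast Int.shiftLeft_eq_mul_pow r k
  have h0 : (0 : Int) ≤ r * 2 ^ k := by positivity
  rw [hmul, PySem.Int.bor_of_nonneg h0 hc]
  have hcast : ((2 : Int)) ^ k = ((2 ^ k : Nat) : Int) := by push_cast; ring
  have htoNat : (r * 2 ^ k).toNat = r.toNat * 2 ^ k := by
    have h1 : ((r * 2 ^ k).toNat : Int) = ((r.toNat * 2 ^ k : Nat) : Int) := by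
      rw [Int.toNat_of_nonneg h0]
      push_cast [Int.toNat_of_nonneg hr]
      ring
    exact_mod_cast h1
  have hc' : c.toNat < 2 ^ k := by
    rw [hcast] at hck
    omega
  have hnat : r.toNat * 2 ^ k ||| c.toNat = r.toNat * 2 ^ k + c.toNat := by
    rw [← Nat.shiftLeft_eq]
    exact (Nat.shiftLeft_add_eq_or_of_lt hc' r.toNat).symm
  rw [htoNat, hnat]
  push_cast
  rw [Int.toNat_of_nonneg hr, Int.toNat_of_nonneg hc]

-- A's inner group fold, rewritten arithmetically
lemma agroup_eq (k : Nat) :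
    ∀ (l : List Int) (r : Int), 0 ≤ r → (∀ i ∈ l, 0 ≤ i ∧ i < 2 ^ k) →
    l.foldl (fun r c => PySem.Int.mod (PySem.Int.bor (r <<< ((k : Nat) : Int)) c) 1000000007) r
      = l.foldl (fun r c => PySem.Int.mod (r * 2 ^ k + c) 1000000007) r := by
  intro l
  induction l with
  | nil => intro r _ _; rfl
  | cons x xs ih =>
    intro r hr hmem
    simp only [List.foldl_cons]
    rw [bor_shl_eq r x k hr (hmem x (by simp)).1 (hmem x (by simp)).2]
    exact ih _ (PySem.Int.mod_nonneg _ (by norm_num)) (fun i hi => hmem i (by simp [hi]))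

-- the pure fold respects congruence mod 1e9+7 in its accumulator
lemma pure_congr (q : Int) :
    ∀ (l : List Int) (a b : Int), a % 1000000007 = b % 1000000007 →
    (l.foldl (fun r c => r * q + c) a) % 1000000007
      = (l.foldl (fun r c => r * q + c) b) % 1000000007 := by
  intro l
  induction l with
  | nil => intro a b h; exact h
  | cons x xs ih =>
    intro a b h
    simp only [List.foldl_cons]
    exact ih _ _ (Int.ModEq.add_right x (Int.ModEq.mul_right q h))

-- A's mod-at-each-step fold equals the pure fold reduced once
lemma modfold (q : Int) :
    ∀ (l : List Int) (r : Int), 0 ≤ r → r < 1000000007 →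
    l.foldl (fun r c => PySem.Int.mod (r * q + c) 1000000007) r
      = (l.foldl (fun r c => r * q + c) r) % 1000000007 := by
  intro l
  induction l with
  | nil =>
    intro r h0 h1
    exact (Int.emod_eq_of_lt h0 h1).symm
  | cons x xs ih =>
    intro r h0 h1
    simp only [List.foldl_cons]
    rw [show PySem.Int.mod (r * q + x) 1000000007 = (r * q + x) % 1000000007 from
      PySem.Int.mod_eq_emod_of_pos (by norm_num)]
    rw [ih _ (Int.emod_nonneg _ (by norm_num)) (Int.emod_lt_of_pos _ (by norm_num))]
    exact pure_congr q xs _ _ (Int.emod_emod_of_dvd _ dvd_rfl)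

lemma pyRange_one_nil (a b : Int) (h : b ≤ a) : PySem.List.pyRange a b 1 = [] := by
  rw [List.eq_nil_iff_forall_not_mem]
  intro i hi
  rw [PySem.List.mem_pyRange_one] at hi
  omega

-- closed form of the pure fold over one block
lemma fold_pure_range (q : Int) :
    ∀ (mN : Nat) (s r : Int),
    (PySem.List.pyRange s (s + (mN : Int)) 1).foldl (fun r c => r * q + c) r
      = r * q ^ mN + s * pvG q mN + pvJ q mN := by
  intro mN
  induction mN with
  | zero =>
    intro s r
    rw [pyRange_one_nil _ _ (by omega)]
    simp [pvG, pvJ]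
  | succ mN ih =>
    intro s r
    have hsplit : PySem.List.pyRange s (s + ((mN + 1 : Nat) : Int)) 1
        = PySem.List.pyRange s (s + (mN : Int)) 1
          ++ PySem.List.pyRange (s + (mN : Int)) (s + ((mN + 1 : Nat) : Int)) 1 :=
      PySem.List.pyRange_one_append _ _ _ (by push_cast; omega) (by omega)
    have hone : PySem.List.pyRange (s + (mN : Int)) (s + ((mN + 1 : Nat) : Int)) 1
        = [s + (mN : Int)] := by
      rw [PySem.List.pyRange_one_cons (by push_cast; omega),
        pyRange_one_nil _ _ (by omega)]
    rw [hsplit, List.foldl_append, ih, hone]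
    simp only [List.foldl_cons, List.foldl_nil, pvG, pvJ, pow_succ]
    push_cast
    ring

-- A exits immediately (whatever the fuel) once start has overtaken n
lemma aLoop_exit (fuel : Nat) (n s r L : Int) (h : ¬ s ≤ n) : concatBinALoop fuel n s r L = r := by
  cases fuel <;> simp [concatBinALoop, h]

lemma bLoop_exit (fuel : Nat) (n s r L : Int) (h : ¬ s ≤ n) : concatBinBLoop fuel n s r L = r := by
  cases fuel <;> simp [concatBinBLoop, h]

-- main invariant: with start = 2^k (bit length k+1) and a reduced accumulator,
-- A's remaining loop and B's remaining loop agree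
lemma loops_eq :
    ∀ (fuel : Nat) (n start r : Int) (k : Nat), start = 2 ^ k → 0 ≤ r → r < 1000000007 →
      (n + 1 - start).toNat ≤ fuel →
      concatBinALoop fuel n start r (((k : Nat) : Int) + 1)
        = concatBinBLoop fuel n start r (((k : Nat) : Int) + 1) := by
  intro fuel
  induction fuel with
  | zero => intro n start r k _ _ _ _; rfl
  | succ fuel ih =>
    intro n start r k hpow hr0 hr1 hfuel
    by_cases hle : start ≤ n
    · have h0 : (0:Int) < 2 ^ k := by positivity
      have hs1 : (1:Int) ≤ start := by omega
      have hshl : start <<< (1:Int) = start * 2 := by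
        have h := Int.shiftLeft_eq_mul_pow start 1
        exact_mod_cast h
      -- the group: e = min (n+1) (2*start), nonempty, of size mN
      set e := min (n + 1) (start * 2) with he
      have hse : start + 1 ≤ e := by omega
      have hee : e ≤ n + 1 := by omega
      set mN := (e - start).toNat with hmN
      have hecast : e = start + ((mN : Nat) : Int) := by omega
      have q2 : (2:Int) ^ (k + 1) = start * 2 := by rw [hpow]; ring
      -- A's one step
      have hA : concatBinALoop (fuel+1) n start r (((k : Nat) : Int) + 1)
          = concatBinALoop fuel n e
              ((PySem.List.pyRange start e 1).foldl
                (fun r c => PySem.Int.mod (PySem.Int.bor (r <<< (((k : Nat) : Int) + 1)) c)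
                  1000000007) r)
              ((((k : Nat) : Int) + 1) + 1) := by
        simp only [concatBinALoop, if_pos hle, hshl, ← he]
      -- A's group value, in closed form
      have hcastk : (((k : Nat) : Int) + 1) = (((k + 1 : Nat)) : Int) := by push_cast; ring
      have hgroupA : (PySem.List.pyRange start e 1).foldl
            (fun r c => PySem.Int.mod (PySem.Int.bor (r <<< (((k : Nat) : Int) + 1)) c)
              1000000007) r
          = (r * (2 ^ (k+1) : Int) ^ mN + start * pvG (2 ^ (k+1) : Int) mN
              + pvJ (2 ^ (k+1) : Int) mN) % 1000000007 := by
        rw [hcastk]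
        rw [agroup_eq (k+1) _ r hr0 ?mem]
        case mem =>
          intro i hi
          rw [PySem.List.mem_pyRange_one] at hi
          constructor
          · omega
          · rw [q2]; omega
        rw [modfold _ _ r hr0 hr1, hecast, fold_pure_range]
      -- B's one step
      have hmB : min n (2 * start - 1) - start + 1 = ((mN : Nat) : Int) := by omega
      have hq : (1 : Int) <<< (((k : Nat) : Int) + 1) = 2 ^ (k + 1) := by
        rw [hcastk]
        have h := Int.shiftLeft_eq_mul_pow (1:Int) (k+1)
        rw [one_mul] at h
        exact_mod_cast h
      have hblock := blockB_eq mN (2 ^ (k+1) : Int) ((mN : Nat) : Int) (by positivity) (by omega)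
      have hB : concatBinBLoop (fuel+1) n start r (((k : Nat) : Int) + 1)
          = concatBinBLoop fuel n (start * 2)
              (PySem.Int.mod
                (r * ((2 ^ (k+1) : Int) ^ mN % 1000000007)
                  + start * (pvG (2 ^ (k+1) : Int) mN % 1000000007)
                  + (pvJ (2 ^ (k+1) : Int) mN % 1000000007)) 1000000007)
              ((((k : Nat) : Int) + 1) + 1) := by
        simp only [concatBinBLoop, if_pos hle, hmB, hq, hblock]
      -- the two new accumulators coincide
      have hracc : PySem.Int.mod
            (r * ((2 ^ (k+1) : Int) ^ mN % 1000000007)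
              + start * (pvG (2 ^ (k+1) : Int) mN % 1000000007)
              + (pvJ (2 ^ (k+1) : Int) mN % 1000000007)) 1000000007
          = (r * (2 ^ (k+1) : Int) ^ mN + start * pvG (2 ^ (k+1) : Int) mN
              + pvJ (2 ^ (k+1) : Int) mN) % 1000000007 := by
        rw [PySem.Int.mod_eq_emod_of_pos (by norm_num)]
        exact (((pv_mm _).mul_left r).add ((pv_mm _).mul_left start)).add (pv_mm _)
      set r' := (r * (2 ^ (k+1) : Int) ^ mN + start * pvG (2 ^ (k+1) : Int) mN
          + pvJ (2 ^ (k+1) : Int) mN) % 1000000007 with hr'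
      have hr'0 : 0 ≤ r' := Int.emod_nonneg _ (by norm_num)
      have hr'1 : r' < 1000000007 := Int.emod_lt_of_pos _ (by norm_num)
      rw [hA, hB, hgroupA, hracc]
      by_cases hbig : start * 2 ≤ n
      · have he' : e = start * 2 := by omega
        have hstep : ((((k : Nat) : Int) + 1) + 1) = (((k + 1 : Nat)) : Int) + 1 := by
          push_cast; ring
        rw [he', hstep]
        exact ih n (start * 2) r' (k + 1) (by rw [hpow]; ring) hr'0 hr'1 (by omega)
      · have hAexit : ¬ e ≤ n := by omega
        rw [aLoop_exit _ _ _ _ _ hAexit, bLoop_exit _ _ _ _ _ (by omega)]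
    · simp [concatBinALoop, concatBinBLoop, hle]

-- ===== VERDICT (by name: the statement is the Claim_ definition above) =====
theorem concatenatedBinary1_spec : Claim_equal_concatenatedBinary1 := by
  intro n _
  unfold Spec_concatenatedBinary1 concatenatedBinary1 concatenatedBinary1_alt
  have h := loops_eq (n.toNat + 1) n 1 0 0 (by norm_num) le_rfl (by norm_num) (by omega)
  simpa using h
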